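-- pv_equiv track=rewrite | github.com/brionydunbar/coding-challenges | CB_string_periods.py | StringPeriods
-- ===== SOURCE A (Python) =====
-- def StringPeriods(strParam):
--     length = len(strParam)
--     for i in range(length // 2, 0, -1):
--         if length % i:
--             continue
--         substring = strParam[0:i]
--         result = substring
--         repeat_number = (length // i) - 1
--
--         for j in range(repeat_number):
--             substring += result
--         if substring == strParam:
--             return result
--     return "-1"
-- ===== SOURCE B (Python) =====
-- def StringPeriods(strParam):
--     n = len(strParam)
--     p = None
--     for i in range(1, n // 2 + 1):
--         if n % i == 0 and all(strParam[j] == strParam[j % i] for j in range(n)):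
--             p = i
--             break
--     if p is None:
--         return "-1"
--     k = n // p  # repeat count, k >= 2
--     q = k  # smallest prime factor of k, by trial division
--     d = 2
--     while d * d <= k:
--         if k % d == 0:
--             q = d
--             break
--         d += 1
--     return strParam[: n // q]
-- ===== Notes on version B (the rewrite author's own statement) =====
-- stated objective: alternative
-- what changed: B finds the smallest periodic prefix with an early-exit character scan and derives A's answer (the longest proper periodic prefix) arithmetically as n divided by the smallest prime factor of the repeat count, instead of A's descending loop that builds a full repeated string for every divisor candidate.
import Mathlib
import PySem

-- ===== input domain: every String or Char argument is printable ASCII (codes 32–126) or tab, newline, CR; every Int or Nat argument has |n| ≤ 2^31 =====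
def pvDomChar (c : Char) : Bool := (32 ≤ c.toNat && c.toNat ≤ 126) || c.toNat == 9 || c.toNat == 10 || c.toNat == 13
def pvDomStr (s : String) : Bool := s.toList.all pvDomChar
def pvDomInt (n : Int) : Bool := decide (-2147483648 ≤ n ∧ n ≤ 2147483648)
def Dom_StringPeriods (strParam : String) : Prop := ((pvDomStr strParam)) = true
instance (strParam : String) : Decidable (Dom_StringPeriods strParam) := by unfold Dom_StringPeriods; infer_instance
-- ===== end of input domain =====

-- B finds the smallest periodic prefix by an early-exit character scan, then jumps to A's answer
-- (the longest proper periodic prefix) arithmetically via the smallest prime factor of the repeat count,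
-- instead of A's descending divisor loop that materialises a full repeated string per candidate.

-- ===== PORT A =====
-- inner loop `for j in range(repeat_number): substring += result`
def pvA_build (result : List Char) (repeatNumber : Nat) (substring : List Char) : List Char :=
  match repeatNumber with
  | 0 => substring
  | m + 1 => pvA_build result m (substring ++ result)

-- `for i in range(length // 2, 0, -1): …` with early return
def pvA_loop (strParam : List Char) (length : Nat) : List Nat → Option (List Char)
  | [] => none
  | i :: rest =>
    if length % i ≠ 0 then pvA_loop strParam length rest
    else
      let substring := strParam.take i
      let result := substring
      let repeatNumber := length / i - 1
      let substring := pvA_build result repeatNumber substring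
      if substring = strParam then some result else pvA_loop strParam length rest

def StringPeriods (strParam : String) : String :=
  let l := strParam.toList
  let length := l.length
  match pvA_loop l length ((List.range' 1 (length / 2)).reverse) with
  | some r => String.ofList r
  | none => "-1"

-- ===== PORT B =====
-- `all(strParam[j] == strParam[j % i] for j in range(n))`
def pvB_check (l : List Char) (n i : Nat) : Bool :=
  (List.range n).all (fun j => l.getD j 'a' == l.getD (j % i) 'a')

-- `for i in range(1, n // 2 + 1): … break` — first (smallest) period dividing n
def pvB_findp (l : List Char) (n : Nat) : List Nat → Option Nat
  | [] => none
  | i :: rest =>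
    if n % i = 0 ∧ pvB_check l n i then some i else pvB_findp l n rest

-- `while d * d <= k: …` — smallest prime factor of k by trial division
def pvB_spf (k d : Nat) : Nat :=
  if d * d ≤ k then
    if k % d = 0 then d else pvB_spf k (d + 1)
  else k
termination_by k + 1 - d
decreasing_by
  rename_i h _
  have hd : d ≤ k := by
    rcases Nat.eq_zero_or_pos d with h0 | h0
    · omega
    · exact le_trans (Nat.le_mul_of_pos_left d h0) h
  omega

def StringPeriods_alt (strParam : String) : String :=
  let l := strParam.toList
  let n := l.length
  match pvB_findp l n (List.range' 1 (n / 2)) with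
  | none => "-1"
  | some p =>
    let k := n / p
    let q := pvB_spf k 2
    String.ofList (l.take (n / q))

-- ===== PRECONDITION & SPEC =====
def Spec_StringPeriods (strParam : String) (out : String) : Prop := out = StringPeriods_alt strParam
instance (strParam : String) (out : String) : Decidable (Spec_StringPeriods strParam out) := by unfold Spec_StringPeriods; infer_instance

-- ===== CLAIM (what is proved, stated in full; the proofs are below) =====
def Claim_equal_StringPeriods : Prop := ∀ (strParam : String), Dom_StringPeriods strParam → Spec_StringPeriods strParam (StringPeriods strParam)

-- ===== LEMMAS AND PROOFS =====

-- `l` has period `i` and `i` divides the length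
def pvPer (l : List Char) (i : Nat) : Prop :=
  i ∣ l.length ∧ ∀ j < l.length, l.getD j 'a' = l.getD (j % i) 'a'

-- `l` is invariant under cyclic rotation by `c`
def pvInv (l : List Char) (c : Nat) : Prop :=
  ∀ j < l.length, l.getD ((j + c) % l.length) 'a' = l.getD j 'a'

-- the success condition of A's loop body at candidate i
def pvQA (l : List Char) (i : Nat) : Prop :=
  l.length % i = 0 ∧ pvA_build (l.take i) (l.length / i - 1) (l.take i) = l

-- the success condition of B's loop body at candidate i
def pvQB (l : List Char) (i : Nat) : Prop :=
  l.length % i = 0 ∧ pvB_check l l.length i = true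

lemma pvA_build_eq (t : List Char) (m : Nat) (s : List Char) :
    pvA_build t m s = s ++ (List.replicate m t).flatten := by
  induction m generalizing s with
  | zero => simp [pvA_build]
  | succ m ih =>
      rw [pvA_build, ih]
      simp [List.replicate_succ, List.append_assoc]

lemma pv_len_flatten_replicate (k : Nat) (t : List Char) :
    ((List.replicate k t).flatten).length = k * t.length := by
  induction k with
  | zero => simp
  | succ k ih => simp [List.replicate_succ, ih, Nat.succ_mul]; ring

lemma pv_getD_flatten_replicate (k : Nat) (t : List Char) (j : Nat)
    (hj : j < k * t.length) :
    ((List.replicate k t).flatten).getD j 'a' = t.getD (j % t.length) 'a' := by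
  induction k generalizing j with
  | zero => omega
  | succ k ih =>
      rw [List.replicate_succ, List.flatten_cons]
      by_cases hlt : j < t.length
      · rw [List.getD_append _ _ _ _ hlt, Nat.mod_eq_of_lt hlt]
      · rw [Nat.not_lt] at hlt
        have hb' : j - t.length < k * t.length := by
          have h : (k + 1) * t.length = k * t.length + t.length := by ring
          omega
        rw [List.getD_append_right _ _ _ _ hlt, ih _ hb']
        congr 1
        conv_rhs => rw [show j = j - t.length + t.length by omega]
        rw [Nat.add_mod_right]

lemma pv_getD_take (l : List Char) (i x : Nat) (hx : x < i) :
    (l.take i).getD x 'a' = l.getD x 'a' := by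
  simp [List.getD, hx]

-- the repeated-prefix equality is exactly pvPer
lemma pv_bridge (l : List Char) (i : Nat) (hi : 0 < i) (hin : i ≤ l.length)
    (hdvd : i ∣ l.length) :
    ((List.replicate (l.length / i) (l.take i)).flatten = l ↔
      ∀ j < l.length, l.getD j 'a' = l.getD (j % i) 'a') := by
  have ht : (l.take i).length = i := by simp; omega
  have hmul : l.length / i * i = l.length := Nat.div_mul_cancel hdvd
  have hlen : ((List.replicate (l.length / i) (l.take i)).flatten).length = l.length := by
    rw [pv_len_flatten_replicate, ht, hmul]
  constructor
  · intro heq j hj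
    have h1 : l.getD j 'a' = (l.take i).getD (j % i) 'a' := by
      conv_lhs => rw [← heq]
      rw [pv_getD_flatten_replicate _ _ _ (by rw [ht, hmul]; exact hj), ht]
    rw [h1, pv_getD_take l i _ (Nat.mod_lt _ hi)]
  · intro hper
    apply List.ext_getElem (by rw [hlen])
    intro j h1 h2
    rw [← List.getD_eq_getElem _ 'a' h1, ← List.getD_eq_getElem _ 'a' h2,
      pv_getD_flatten_replicate _ _ _ (by rw [ht, hmul]; exact h2), ht,
      pv_getD_take l i _ (Nat.mod_lt _ hi), ← hper j h2]

lemma pv_build_flatten (l : List Char) (i : Nat) (hi : 0 < i) (hin : i ≤ l.length) :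
    pvA_build (l.take i) (l.length / i - 1) (l.take i)
      = (List.replicate (l.length / i) (l.take i)).flatten := by
  rw [pvA_build_eq]
  have hq : l.length / i - 1 + 1 = l.length / i := by
    have := (Nat.one_le_div_iff hi).mpr hin
    omega
  conv_rhs => rw [← hq]
  rw [List.replicate_succ, List.flatten_cons]

lemma pvQA_iff (l : List Char) (i : Nat) (hi : 0 < i) (hin : i ≤ l.length) :
    pvQA l i ↔ pvPer l i := by
  unfold pvQA pvPer
  constructor
  · rintro ⟨h0, hbuild⟩
    have hdvd : i ∣ l.length := (Nat.dvd_iff_mod_eq_zero).mpr h0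
    rw [pv_build_flatten l i hi hin] at hbuild
    exact ⟨hdvd, (pv_bridge l i hi hin hdvd).mp hbuild⟩
  · rintro ⟨hdvd, hper⟩
    refine ⟨(Nat.dvd_iff_mod_eq_zero).mp hdvd, ?_⟩
    rw [pv_build_flatten l i hi hin]
    exact (pv_bridge l i hi hin hdvd).mpr hper

lemma pvQB_iff (l : List Char) (i : Nat) :
    pvQB l i ↔ pvPer l i := by
  unfold pvQB pvPer pvB_check
  simp only [List.all_eq_true, List.mem_range, beq_iff_eq]
  constructor
  · rintro ⟨h0, h⟩
    exact ⟨(Nat.dvd_iff_mod_eq_zero).mpr h0, h⟩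
  · rintro ⟨h0, h⟩
    exact ⟨(Nat.dvd_iff_mod_eq_zero).mp h0, h⟩

-- closure of pvPer under multiples dividing the length
lemma pvPer_mult (l : List Char) (p m : Nat) (hp : pvPer l p) (hpm : p ∣ m)
    (hmn : m ∣ l.length) : pvPer l m := by
  refine ⟨hmn, fun j hj => ?_⟩
  rw [hp.2 j hj, hp.2 (j % m) (lt_of_le_of_lt (Nat.mod_le j m) hj),
    Nat.mod_mod_of_dvd j hpm]

lemma pvInv_of_per (l : List Char) (i : Nat) (hp : pvPer l i) :
    pvInv l i := by
  intro j hj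
  have hn : 0 < l.length := lt_of_le_of_lt (Nat.zero_le j) hj
  rw [hp.2 ((j + i) % l.length) (Nat.mod_lt _ hn),
    Nat.mod_mod_of_dvd _ hp.1, Nat.add_mod_right, ← hp.2 j hj]

lemma pvInv_add (l : List Char) (a b : Nat) (ha : pvInv l a) (hb : pvInv l b) :
    pvInv l (a + b) := by
  intro j hj
  have hn : 0 < l.length := lt_of_le_of_lt (Nat.zero_le j) hj
  have h1 := hb ((j + a) % l.length) (Nat.mod_lt _ hn)
  rw [Nat.mod_add_mod] at h1
  rw [← Nat.add_assoc, h1, ha j hj]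

lemma pvInv_mul (l : List Char) (m c : Nat) (hc : pvInv l c) : pvInv l (m * c) := by
  induction m with
  | zero => intro j hj; simp [Nat.mod_eq_of_lt hj]
  | succ m ih =>
      have := pvInv_add l (m * c) c ih hc
      simpa [Nat.succ_mul] using this

lemma pvInv_sub (l : List Char) (a b : Nat) (ha : pvInv l a) (hb : pvInv l b)
    (hba : b ≤ a) : pvInv l (a - b) := by
  intro j hj
  have hn : 0 < l.length := lt_of_le_of_lt (Nat.zero_le j) hj
  have h1 := hb ((j + (a - b)) % l.length) (Nat.mod_lt _ hn)
  rw [Nat.mod_add_mod, show j + (a - b) + b = j + a by omega] at h1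
  rw [← h1]; exact ha j hj

lemma pvInv_gcd (l : List Char) : ∀ a b, pvInv l a → pvInv l b →
    pvInv l (Nat.gcd a b) := by
  intro a b
  induction a, b using Nat.gcd.induction with
  | H0 b => intro _ hb; simpa using hb
  | H1 a b hpos ih =>
      intro ha hb
      have h1 : pvInv l (a * (b / a)) := by
        have := pvInv_mul l (b / a) a ha
        rwa [Nat.mul_comm] at this
      have h3 := Nat.mod_add_div b a
      have h2 : pvInv l (b % a) := by
        have h4 : b % a = b - a * (b / a) := by omega
        rw [h4]
        exact pvInv_sub l b (a * (b / a)) hb h1 (by omega)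
      rw [Nat.gcd_rec]
      exact ih h2 ha

lemma pvPer_of_inv (l : List Char) (g : Nat) (hg : 0 < g) (hdvd : g ∣ l.length)
    (hinv : pvInv l g) : pvPer l g := by
  refine ⟨hdvd, fun j hj => ?_⟩
  induction j using Nat.strong_induction_on with
  | _ j ih =>
      by_cases hlt : j < g
      · rw [Nat.mod_eq_of_lt hlt]
      · rw [Nat.not_lt] at hlt
        have h1 := hinv (j - g) (by omega)
        rw [show j - g + g = j by omega, Nat.mod_eq_of_lt hj] at h1
        rw [h1, ih (j - g) (by omega) (by omega)]
        congr 1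
        conv_rhs => rw [show j = j - g + g by omega]
        rw [Nat.add_mod_right]

lemma pvPer_gcd (l : List Char) (p x : Nat) (hp0 : 0 < p)
    (hp : pvPer l p) (hx : pvPer l x) : pvPer l (Nat.gcd p x) := by
  refine pvPer_of_inv l _ (Nat.gcd_pos_of_pos_left _ hp0)
    (Nat.dvd_trans (Nat.gcd_dvd_left p x) hp.1) ?_
  exact pvInv_gcd l p x (pvInv_of_per l p hp) (pvInv_of_per l x hx)

-- when trial division runs out, k itself is its least divisor ≥ 2
lemma pvB_spf_base (k d : Nat) (hk : 2 ≤ k) (hdd : ¬ d * d ≤ k)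
    (hnone : ∀ e, 2 ≤ e → e < d → ¬ e ∣ k) :
    ∀ e, 2 ≤ e → e ∣ k → k ≤ e := by
  intro e he hedvd
  by_contra hlt
  rw [not_le] at hlt
  obtain ⟨f, hf⟩ := hedvd
  have hf0 : f ≠ 0 := by rintro rfl; omega
  have hf2 : 2 ≤ f := by
    rcases Nat.lt_or_ge f 2 with h2 | h2
    · interval_cases f
      · omega
      · omega
    · exact h2
  have hfe : ¬ (d ≤ e ∧ d ≤ f) := by
    rintro ⟨h1, h2⟩
    have : d * d ≤ e * f := Nat.mul_le_mul h1 h2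
    omega
  rcases Nat.lt_or_ge e d with h | h
  · exact hnone e he h ⟨f, hf⟩
  · have hfd : f < d := by omega
    exact hnone f hf2 hfd ⟨e, by rw [hf]; ring⟩

-- trial division finds the least divisor ≥ 2
lemma pvB_spf_spec (k : Nat) (hk : 2 ≤ k) : ∀ d, 2 ≤ d →
    (∀ e, 2 ≤ e → e < d → ¬ e ∣ k) →
    pvB_spf k d ∣ k ∧ 2 ≤ pvB_spf k d ∧ ∀ e, 2 ≤ e → e ∣ k → pvB_spf k d ≤ e := by
  suffices H : ∀ fuel d, k + 1 - d ≤ fuel → 2 ≤ d →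
      (∀ e, 2 ≤ e → e < d → ¬ e ∣ k) →
      pvB_spf k d ∣ k ∧ 2 ≤ pvB_spf k d ∧ ∀ e, 2 ≤ e → e ∣ k → pvB_spf k d ≤ e by
    exact fun d hd hn => H (k + 1 - d) d le_rfl hd hn
  intro fuel
  induction fuel with
  | zero =>
      intro d hle hd hnone
      have hdd : ¬ d * d ≤ k := by
        intro hcon
        have : d ≤ d * d := Nat.le_mul_of_pos_left d (by omega)
        omega
      rw [pvB_spf, if_neg hdd]
      exact ⟨dvd_refl k, hk, pvB_spf_base k d hk hdd hnone⟩
  | succ fuel ih =>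
      intro d hle hd hnone
      rw [pvB_spf]
      by_cases hdd : d * d ≤ k
      · rw [if_pos hdd]
        by_cases hmod : k % d = 0
        · rw [if_pos hmod]
          have hdvd : d ∣ k := (Nat.dvd_iff_mod_eq_zero).mpr hmod
          refine ⟨hdvd, hd, fun e he hedvd => ?_⟩
          by_contra hlt
          rw [not_le] at hlt
          exact hnone e he hlt hedvd
        · rw [if_neg hmod]
          have hd2 : d ≤ k := le_trans (Nat.le_mul_of_pos_left d (by omega)) hdd
          apply ih (d + 1) (by omega) (by omega)
          intro e he helt
          by_cases he' : e < d
          · exact hnone e he he'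
          · have hed : e = d := by omega
            subst hed
            intro hdvd
            exact hmod (Nat.dvd_iff_mod_eq_zero.mp hdvd)
      · rw [if_neg hdd]
        exact ⟨dvd_refl k, hk, pvB_spf_base k d hk hdd hnone⟩

-- B's loop over range' a m : characterisation of `some`
lemma pvB_findp_some (l : List Char) (n : Nat) (a m p : Nat)
    (h : pvB_findp l n (List.range' a m) = some p) :
    n = l.length →
    (pvQB l p ∧ a ≤ p ∧ p < a + m ∧ ∀ x, a ≤ x → x < p → ¬ pvQB l x) := by
  rintro rfl
  induction m generalizing a with
  | zero => simp [pvB_findp] at h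
  | succ m ih =>
      rw [List.range'_succ, pvB_findp] at h
      by_cases hQ : l.length % a = 0 ∧ pvB_check l l.length a
      · rw [if_pos hQ] at h
        obtain rfl : a = p := by injection h
        exact ⟨hQ, le_rfl, by omega, fun x h1 h2 => absurd h1 (by omega)⟩
      · rw [if_neg hQ] at h
        obtain ⟨h1, h2, h3, h4⟩ := ih (a + 1) h
        refine ⟨h1, by omega, by omega, fun x hx1 hx2 => ?_⟩
        by_cases hxa : x = a
        · subst hxa; exact hQ
        · exact h4 x (by omega) hx2

lemma pvB_findp_none (l : List Char) (n : Nat) (lst : List Nat) :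
    pvB_findp l n lst = none ↔ ∀ x ∈ lst, ¬ (n % x = 0 ∧ pvB_check l n x = true) := by
  induction lst with
  | nil => simp [pvB_findp]
  | cons i rest ih =>
      rw [pvB_findp]
      by_cases h : n % i = 0 ∧ pvB_check l n i
      · simp [h]
      · rw [if_neg h, ih]
        simp only [List.mem_cons]
        constructor
        · intro hall x hx
          rcases hx with rfl | hx
          · exact h
          · exact hall x hx
        · intro hall x hx
          exact hall x (Or.inr hx)

-- A's loop over the reversed range : characterisation
lemma pvA_loop_none (l : List Char) (lst : List Nat) :
    pvA_loop l l.length lst = none ↔ ∀ x ∈ lst, ¬ pvQA l x := by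
  induction lst with
  | nil => simp [pvA_loop]
  | cons i rest ih =>
      rw [pvA_loop]
      by_cases h0 : l.length % i ≠ 0
      · rw [if_pos h0, ih]
        constructor
        · intro hall x hx
          rcases List.mem_cons.mp hx with rfl | hx'
          · intro hQ; exact h0 hQ.1
          · exact hall x hx'
        · intro hall x hx
          exact hall x (List.mem_cons_of_mem i hx)
      · rw [if_neg h0]
        rw [not_ne_iff] at h0
        dsimp only
        by_cases heq : pvA_build (l.take i) (l.length / i - 1) (l.take i) = l
        · rw [if_pos heq]
          constructor
          · intro hcon; exact absurd hcon (by simp)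
          · intro hall
            exact absurd ⟨h0, heq⟩ (hall i (List.mem_cons_self))
        · rw [if_neg heq, ih]
          constructor
          · intro hall x hx
            rcases List.mem_cons.mp hx with rfl | hx'
            · intro hQ; exact heq hQ.2
            · exact hall x hx'
          · intro hall x hx
            exact hall x (List.mem_cons_of_mem i hx)

lemma pvA_loop_some (l : List Char) (m : Nat) (r : List Char)
    (h : pvA_loop l l.length ((List.range' 1 m).reverse) = some r) :
    ∃ i, pvQA l i ∧ 1 ≤ i ∧ i ≤ m ∧ (∀ x, i < x → x ≤ m → ¬ pvQA l x) ∧ r = l.take i := by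
  induction m with
  | zero => simp [pvA_loop] at h
  | succ m ih =>
      rw [List.range'_concat, List.reverse_append, List.reverse_singleton,
        List.singleton_append, pvA_loop] at h
      simp only [Nat.one_mul] at h
      by_cases h0 : l.length % (1 + m) ≠ 0
      · rw [if_pos h0] at h
        obtain ⟨i, hQ, hi1, hi2, hmax, hr⟩ := ih h
        refine ⟨i, hQ, hi1, by omega, fun x hx1 hx2 => ?_, hr⟩
        by_cases hxm : x = m + 1
        · subst hxm
          intro hQx
          exact h0 (by rw [Nat.add_comm 1 m]; exact hQx.1)
        · exact hmax x hx1 (by omega)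
      · rw [if_neg h0] at h
        rw [not_ne_iff] at h0
        by_cases heq : pvA_build (l.take (1 + m)) (l.length / (1 + m) - 1) (l.take (1 + m)) = l
        · rw [if_pos heq] at h
          refine ⟨1 + m, ⟨h0, heq⟩, by omega, by omega, fun x hx1 hx2 => by omega, ?_⟩
          injection h.symm
        · rw [if_neg heq] at h
          obtain ⟨i, hQ, hi1, hi2, hmax, hr⟩ := ih h
          refine ⟨i, hQ, hi1, by omega, fun x hx1 hx2 => ?_, hr⟩
          by_cases hxm : x = 1 + m
          · subst hxm
            intro hQx
            exact heq hQx.2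
          · exact hmax x hx1 (by omega)

-- ===== VERDICT (by name: the statement is the Claim_ definition above) =====
theorem StringPeriods_spec : Claim_equal_StringPeriods := by
  intro s _
  unfold Spec_StringPeriods StringPeriods StringPeriods_alt
  dsimp only
  set l := s.toList with hl
  cases hB : pvB_findp l l.length (List.range' 1 (l.length / 2)) with
  | none =>
      have hall := (pvB_findp_none l l.length _).mp hB
      have hA : pvA_loop l l.length ((List.range' 1 (l.length / 2)).reverse) = none := by
        rw [pvA_loop_none]
        intro x hx
        have hx' : x ∈ List.range' 1 (l.length / 2) := List.mem_reverse.mp hx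
        obtain ⟨i, hi, rfl⟩ := List.mem_range'.mp hx'
        intro hQA
        have hper := (pvQA_iff l _ (by omega)
          (by have := Nat.div_le_self l.length 2; omega)).mp hQA
        exact hall _ hx' ((pvQB_iff l _).mpr hper)
      rw [hA]
  | some p =>
      dsimp only
      obtain ⟨hQBp, hp1, hp2, hmin⟩ := pvB_findp_some l l.length 1 (l.length / 2) p hB rfl
      have hPerp := (pvQB_iff l p).mp hQBp
      have hpn : p ∣ l.length := hPerp.1
      have hple : p ≤ l.length / 2 := by omega
      have h2p : p * 2 ≤ l.length := (Nat.le_div_iff_mul_le (by norm_num)).mp hple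
      have hn0 : 0 < l.length := by omega
      obtain ⟨c, hc⟩ := hpn
      have hcp : l.length / p = c := by
        rw [hc, Nat.mul_div_cancel_left _ (show 0 < p by omega)]
      have hk2 : 2 ≤ c := by
        by_contra hcon
        rw [not_le] at hcon
        have h1 : p * c ≤ p * 1 := Nat.mul_le_mul_left p (by omega)
        omega
      rw [hcp]
      obtain ⟨hqk, hq2, hqmin⟩ := pvB_spf_spec c hk2 2 le_rfl
        (fun e he helt => absurd he (by omega))
      have hcn : c ∣ l.length := ⟨p, by rw [hc]; ring⟩
      have hqn : pvB_spf c 2 ∣ l.length := hqk.trans hcn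
      have hpi : p ∣ l.length / pvB_spf c 2 :=
        ⟨c / pvB_spf c 2, by rw [hc, Nat.mul_div_assoc p hqk]⟩
      have histn : l.length / pvB_spf c 2 ∣ l.length :=
        ⟨pvB_spf c 2, (Nat.div_mul_cancel hqn).symm⟩
      have hist_pos : 0 < l.length / pvB_spf c 2 :=
        Nat.div_pos (Nat.le_of_dvd hn0 hqn) (by omega)
      have hist_le : l.length / pvB_spf c 2 ≤ l.length / 2 :=
        Nat.div_le_div_left hq2 (by omega)
      have hPeristar : pvPer l (l.length / pvB_spf c 2) :=
        pvPer_mult l p _ hPerp hpi histn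
      have hQAistar : pvQA l (l.length / pvB_spf c 2) :=
        (pvQA_iff l _ hist_pos
          (le_trans hist_le (Nat.div_le_self l.length 2))).mpr hPeristar
      -- any admissible periodic prefix length is at most l.length / spf
      have hmax : ∀ x, 1 ≤ x → x ≤ l.length / 2 → pvQA l x →
          x ≤ l.length / pvB_spf c 2 := by
        intro x hx1 hx2 hQAx
        have hxn' : x ≤ l.length := le_trans hx2 (Nat.div_le_self _ 2)
        have hPerx := (pvQA_iff l x (by omega) hxn').mp hQAx
        have hxn : x ∣ l.length := hPerx.1
        have hPerg : pvPer l (Nat.gcd p x) :=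
          pvPer_gcd l p x (by omega) hPerp hPerx
        have hgp : Nat.gcd p x ∣ p := Nat.gcd_dvd_left p x
        have hg1 : 1 ≤ Nat.gcd p x := Nat.gcd_pos_of_pos_left x (by omega)
        have hgeq : Nat.gcd p x = p := by
          by_contra hne
          have hglt : Nat.gcd p x < p := lt_of_le_of_ne (Nat.le_of_dvd (by omega) hgp) hne
          exact hmin _ hg1 hglt ((pvQB_iff l _).mpr hPerg)
        have hpx : p ∣ x := hgeq ▸ Nat.gcd_dvd_right p x
        obtain ⟨m, hm⟩ := hpx
        have hm1 : 0 < m := by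
          rcases Nat.eq_zero_or_pos m with rfl | h
          · omega
          · exact h
        have hmk : m ∣ c := by
          have hx2' := hxn
          rw [hm, hc] at hx2'
          exact (Nat.mul_dvd_mul_iff_left (show 0 < p by omega)).mp hx2'
        have hnx : l.length / x = c / m := by
          rw [hc, hm, Nat.mul_div_mul_left _ _ (show 0 < p by omega)]
        have h2x : 2 ≤ l.length / x := by
          have h2 : x * 2 ≤ l.length := (Nat.le_div_iff_mul_le (by norm_num)).mp hx2
          exact (Nat.le_div_iff_mul_le (by omega)).mpr (by omega)
        have hkm : c / m ∣ c := ⟨m, (Nat.div_mul_cancel hmk).symm⟩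
        have hqnx : pvB_spf c 2 ≤ l.length / x := by
          rw [hnx]
          exact hqmin _ (by rw [← hnx]; exact h2x) hkm
        have hxx : x = l.length / (l.length / x) := (Nat.div_div_self hxn (by omega)).symm
        rw [hxx]
        exact Nat.div_le_div_left hqnx (by omega)
      cases hA : pvA_loop l l.length ((List.range' 1 (l.length / 2)).reverse) with
      | none =>
          exfalso
          have hall := (pvA_loop_none l _).mp hA
          refine hall _ ?_ hQAistar
          rw [List.mem_reverse]
          exact List.mem_range'.mpr ⟨l.length / pvB_spf c 2 - 1,
            by omega, by omega⟩
      | some r =>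
          obtain ⟨i, hQAi, hi1, hi2, hmax', hr⟩ := pvA_loop_some l (l.length / 2) r hA
          have hile : i ≤ l.length / pvB_spf c 2 := hmax i hi1 hi2 hQAi
          have hige : l.length / pvB_spf c 2 ≤ i := by
            by_contra hlt
            rw [not_le] at hlt
            exact hmax' _ hlt hist_le hQAistar
          rw [hr, le_antisymm hile hige]
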